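-- pv_equiv track=rewrite | github.com/cafrii/omega2 | 백준/Gold/10026. 적록색약/10026.py | solve
-- ===== SOURCE A (Python) =====
-- def solve(pic:list[str])->tuple[int,int]:
--     N = len(pic)
--
--     visited = [ [-1 for c in range(N)] for r in range(N)]
--
--     def mark(y0, x0, id, pred):
--         # (y0,x0) 에서부터 시작하는 연속 영역을 찾아서 id 로 마킹
--         # visited[][] 에 id 기록
--
--         stack = [(y0,x0)]
--         visited[y0][x0] = id
--
--         deltas = [(-1,0),(1,0),(0,-1),(0,1)]
--         while stack:
--             y,x = stack.pop()
--             col = pic[y][x]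
--
--             for dy,dx in deltas:
--                 ny,nx = y+dy,x+dx
--                 if not (0<=ny<N and 0<=nx<N):
--                     continue
--                 if visited[ny][nx] >= 0: # already visited
--                     continue
--                 if not pred(pic[ny][nx], col):
--                     continue
--                 stack.append((ny,nx))
--                 visited[ny][nx] = id
--
--     def count_regions(pred):
--         num = 0 # number of region
--         for y in range(N):
--             for x in range(N):
--                 if visited[y][x] >= 0:
--                     continue
--                 mark(y, x, num, pred)
--                 num += 1
--         return num
--
--     # predicate for each cases
--     def pred_normal(c1, c2):
--         return c1 == c2
--     def pred_weak(c1, c2):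
--         return (c1 == c2 or (c1,c2) == ('R','G') or (c1,c2) == ('G','R'))
--
--     n1 = count_regions(pred_normal)
--
--     # reset visited and check again
--     for a in visited:
--         a[:] = [-1 for c in range(N)]
--     n2 = count_regions(pred_weak)
--
--     return (n1, n2)
-- ===== SOURCE B (Python) =====
-- def solve(pic: list[str]) -> tuple[int, int]:
--     # Union-find (disjoint sets) over the N*N cells, indexed y*N+x.
--     # Each right/down neighbouring pair that the predicate accepts is unioned,
--     # always attaching the larger root below the smaller one, so every final
--     # root is the smallest index of its region; regions = self-rooted cells.
--     N = len(pic)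
--
--     def count(same):
--         parent = list(range(N * N))
--
--         def find(i):
--             while parent[i] != i:
--                 i = parent[i]
--             return i
--
--         for y in range(N):
--             for x in range(N):
--                 for ny, nx in ((y + 1, x), (y, x + 1)):
--                     if ny < N and nx < N and same(pic[ny][nx], pic[y][x]):
--                         a, b = find(y * N + x), find(ny * N + nx)
--                         if a != b:
--                             if a < b:
--                                 a, b = b, a
--                             parent[a] = b
--         return sum(1 for i in range(N * N) if parent[i] == i)
--
--     normal = count(lambda c1, c2: c1 == c2)
--     weak = count(lambda c1, c2: c1 == c2 or (c1 in 'RG' and c2 in 'RG'))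
--     return (normal, weak)
-- ===== Notes on version B (the rewrite author's own statement) =====
-- stated objective: alternative
-- what changed: Replaces the per-seed stack DFS flood fill with a visited matrix by a union-find over cell indices y*N+x: each accepted right/down neighbour pair is unioned (larger root attached under the smaller), and each region count is the number of self-rooted cells.
import Mathlib
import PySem

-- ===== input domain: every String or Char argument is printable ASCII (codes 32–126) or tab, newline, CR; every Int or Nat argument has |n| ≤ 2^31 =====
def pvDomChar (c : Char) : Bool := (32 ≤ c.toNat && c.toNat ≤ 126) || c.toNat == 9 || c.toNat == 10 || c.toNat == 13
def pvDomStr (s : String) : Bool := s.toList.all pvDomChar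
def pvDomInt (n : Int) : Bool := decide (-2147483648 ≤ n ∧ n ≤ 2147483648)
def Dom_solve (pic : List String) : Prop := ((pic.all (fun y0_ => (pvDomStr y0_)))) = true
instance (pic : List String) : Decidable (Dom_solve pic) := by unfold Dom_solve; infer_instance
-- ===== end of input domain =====

-- B replaces A's per-seed stack DFS flood fill by a union-find over cell indices y*N+x
-- (alternative algorithm, similar cost); equality of the two region counts is proved below.

-- ===== PORT A =====
-- pic[y][x]; exact whenever 0 ≤ y < len(pic) and 0 ≤ x < len(pic[y]) (guaranteed under Pre_solve)
def pvCharAt (pic : List String) (y x : Nat) : Char := ((pic.getD y "").toList).getD x ' '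

def pvPredNormal (c1 c2 : Char) : Bool := c1 == c2
def pvPredWeak (c1 c2 : Char) : Bool := c1 == c2 || (c1 == 'R' && c2 == 'G') || (c1 == 'G' && c2 == 'R')

-- visited[y][x] read/write; out-of-range reads give -1 (never happens on A's in-bounds accesses)
def pvGetV (v : List (List Int)) (y x : Nat) : Int := (v.getD y []).getD x (-1)
def pvSetV (v : List (List Int)) (y x : Nat) (idv : Int) : List (List Int) :=
  v.set y ((v.getD y []).set x idv)

-- the `while stack:` loop of mark(); the Python stack's top is the list head here,
-- so append+pop-at-the-end becomes cons+head; fuel bounds the iteration count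
-- (2*N*N+1 provably exceeds the measure |stack| + 2*#unvisited, so it is never exhausted)
def pvMarkLoop (pic : List String) (N : Nat) (p : Char → Char → Bool) (idv : Int) :
    Nat → List (List Int) → List (Nat × Nat) → List (List Int)
  | 0, v, _ => v
  | _+1, v, [] => v
  | f+1, v, (y, x) :: rest =>
      let col := pvCharAt pic y x
      let s := [((-1:Int),(0:Int)), (1,0), (0,-1), (0,1)].foldl
        (fun (s : List (List Int) × List (Nat × Nat)) d =>
          let ny : Int := (y : Int) + d.1
          let nx : Int := (x : Int) + d.2
          if 0 ≤ ny ∧ ny < (N:Int) ∧ 0 ≤ nx ∧ nx < (N:Int) then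
            if 0 ≤ pvGetV s.1 ny.toNat nx.toNat then s
            else if p (pvCharAt pic ny.toNat nx.toNat) col then
              (pvSetV s.1 ny.toNat nx.toNat idv, (ny.toNat, nx.toNat) :: s.2)
            else s
          else s)
        (v, rest)
      pvMarkLoop pic N p idv f s.1 s.2

def pvMark (pic : List String) (N : Nat) (p : Char → Char → Bool)
    (y0 x0 : Nat) (idv : Int) (v : List (List Int)) : List (List Int) :=
  pvMarkLoop pic N p idv (2*N*N + 1) (pvSetV v y0 x0 idv) [(y0, x0)]

-- count_regions: the nested for y / for x scan with a fresh all(-1) visited matrix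
def pvScan (pic : List String) (N : Nat) (p : Char → Char → Bool) : Int × List (List Int) :=
  (List.range N).foldl (fun s y => (List.range N).foldl (fun s x =>
      if 0 ≤ pvGetV s.2 y x then s
      else (s.1 + 1, pvMark pic N p y x s.1 s.2)) s)
    (0, (List.range N).map (fun _ => (List.range N).map (fun _ => (-1:Int))))

def solve (pic : List String) : Int × Int :=
  let N := pic.length
  ((pvScan pic N pvPredNormal).1, (pvScan pic N pvPredWeak).1)

-- ===== PORT B =====
def pvSameWeak (c1 c2 : Char) : Bool :=
  c1 == c2 || ((c1 == 'R' || c1 == 'G') && (c2 == 'R' || c2 == 'G'))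

-- find(i): while parent[i] != i: i = parent[i]; fuel N*N suffices since parent[i] ≤ i;
-- all parent entries are nonnegative, so .toNat on the read entry is exact
def pvUfFind (par : List Int) : Nat → Nat → Nat
  | 0, i => i
  | f+1, i =>
      let e := par.getD i (Int.ofNat i)
      if e = (i : Int) then i else pvUfFind par f e.toNat

def pvUnion (N : Nat) (par : List Int) (u w : Nat) : List Int :=
  let a := pvUfFind par (N*N) u
  let b := pvUfFind par (N*N) w
  if a = b then par else par.set (max a b) ((min a b : Nat) : Int)

def pvCount (pic : List String) (N : Nat) (p : Char → Char → Bool) : Int :=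
  let par := (List.range N).foldl (fun par y => (List.range N).foldl (fun par x =>
      [(y+1, x), (y, x+1)].foldl (fun par (c : Nat × Nat) =>
        if c.1 < N ∧ c.2 < N ∧ p (pvCharAt pic c.1 c.2) (pvCharAt pic y x) = true then
          pvUnion N par (y*N + x) (c.1*N + c.2)
        else par) par) par)
    ((List.range (N*N)).map (fun i : Nat => (i : Int)))
  ((List.range (N*N)).countP (fun i => par.getD i 0 == (i : Int)) : Int)

def solve_alt (pic : List String) : Int × Int :=
  let N := pic.length
  (pvCount pic N (fun c1 c2 => c1 == c2), pvCount pic N pvSameWeak)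

-- ===== PRECONDITION & SPEC =====
-- A indexes pic[y][x] for every 0 ≤ y,x < len(pic): any row shorter than len(pic)
-- raises IndexError, so exactly those inputs are excluded.
def Pre_solve (pic : List String) : Prop := ∀ s ∈ pic, pic.length ≤ s.toList.length
instance (pic : List String) : Decidable (Pre_solve pic) := by unfold Pre_solve; infer_instance

def pvWitness_solve : List String := ["RG", "GB"]

def Spec_solve (pic : List String) (out : Int × Int) : Prop := out = solve_alt pic
instance (pic : List String) (out : Int × Int) : Decidable (Spec_solve pic out) := by
  unfold Spec_solve; infer_instance

-- ===== CLAIM (what is proved, stated in full; the proofs are below) =====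
def Claim_equal_solve : Prop := ∀ (pic : List String), Dom_solve pic → Pre_solve pic → Spec_solve pic (solve pic)

-- ===== LEMMAS AND PROOFS =====

-- ===== semantic layer =====
def pvInB (N : Nat) (c : Nat × Nat) : Prop := c.1 < N ∧ c.2 < N

def pvNbr (a b : Nat × Nat) : Prop :=
  (a.1 = b.1 ∧ (a.2 + 1 = b.2 ∨ b.2 + 1 = a.2)) ∨ (a.2 = b.2 ∧ (a.1 + 1 = b.1 ∨ b.1 + 1 = a.1))

def pvStep (pic : List String) (N : Nat) (p : Char → Char → Bool) (U : Nat × Nat → Prop)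
    (a b : Nat × Nat) : Prop :=
  pvInB N a ∧ pvInB N b ∧ U b ∧ pvNbr a b ∧
    p (pvCharAt pic b.1 b.2) (pvCharAt pic a.1 a.2) = true

def pvReach (pic : List String) (N : Nat) (p : Char → Char → Bool) (U : Nat × Nat → Prop) :
    Nat × Nat → Nat × Nat → Prop := Relation.ReflTransGen (pvStep pic N p U)

def pvConn (pic : List String) (N : Nat) (p : Char → Char → Bool) : Nat × Nat → Nat × Nat → Prop :=
  pvReach pic N p (fun _ => True)

abbrev pvMarked (v : List (List Int)) (c : Nat × Nat) : Prop := 0 ≤ pvGetV v c.1 c.2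

def pvShape (N : Nat) (v : List (List Int)) : Prop := v.length = N ∧ ∀ r ∈ v, r.length = N


-- matrix lemmas
theorem pvRow_mem (v : List (List Int)) (y : Nat) (hy : y < v.length) : v.getD y [] ∈ v := by
  rw [List.getD_eq_getElem?_getD, List.getElem?_eq_getElem hy]
  exact List.getElem_mem _

theorem pvGetV_set_same (v : List (List Int)) (N y x : Nat) (idv : Int)
    (hs : pvShape N v) (hy : y < N) (hx : x < N) :
    pvGetV (pvSetV v y x idv) y x = idv := by
  rcases hs with ⟨hl, hr⟩
  have hyv : y < v.length := by omega
  have hrow : (v.getD y []).length = N := hr _ (pvRow_mem v y hyv)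
  unfold pvGetV pvSetV
  rw [List.getD_eq_getElem?_getD (l := v.set y ((v.getD y []).set x idv)),
    List.getElem?_set_self hyv]
  simp only [Option.getD_some]
  rw [List.getD_eq_getElem?_getD, List.getElem?_set_self (by omega)]
  rfl

theorem pvGetV_set_other (v : List (List Int)) (y x : Nat) (idv : Int) (y' x' : Nat)
    (hne : ¬ (y' = y ∧ x' = x)) :
    pvGetV (pvSetV v y x idv) y' x' = pvGetV v y' x' := by
  unfold pvGetV pvSetV
  by_cases hy : y' = y
  · subst hy
    have hx : x ≠ x' := by intro h; exact hne ⟨rfl, h.symm⟩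
    by_cases hyv : y' < v.length
    · rw [List.getD_eq_getElem?_getD (l := v.set y' ((v.getD y' []).set x idv)),
        List.getElem?_set_self hyv]
      simp only [Option.getD_some]
      rw [List.getD_eq_getElem?_getD (l := (v.getD y' []).set x idv),
        List.getElem?_set_ne hx, ← List.getD_eq_getElem?_getD]
    · rw [List.set_eq_of_length_le (by omega)]
  · rw [List.getD_eq_getElem?_getD (l := v.set y ((v.getD y []).set x idv)),
      List.getElem?_set_ne (fun h => hy h.symm), ← List.getD_eq_getElem?_getD]

theorem pvShape_set (v : List (List Int)) (N y x : Nat) (idv : Int) (hs : pvShape N v) :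
    pvShape N (pvSetV v y x idv) := by
  rcases hs with ⟨hl, hr⟩
  by_cases hyv : y < v.length
  · refine ⟨by simp [pvSetV, hl], ?_⟩
    intro r hrm
    rcases List.mem_or_eq_of_mem_set hrm with h | h
    · exact hr _ h
    · subst h; simpa using hr _ (pvRow_mem v y hyv)
  · unfold pvSetV
    rw [List.set_eq_of_length_le (by omega)]
    exact ⟨hl, hr⟩

-- ===== the inner 4-delta fold of mark()'s while loop =====
def pvG (pic : List String) (N : Nat) (p : Char → Char → Bool) (idv : Int) (y x : Nat)
    (s : List (List Int) × List (Nat × Nat)) (d : Int × Int) :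
    List (List Int) × List (Nat × Nat) :=
  let ny : Int := (y : Int) + d.1
  let nx : Int := (x : Int) + d.2
  if 0 ≤ ny ∧ ny < (N:Int) ∧ 0 ≤ nx ∧ nx < (N:Int) then
    if 0 ≤ pvGetV s.1 ny.toNat nx.toNat then s
    else if p (pvCharAt pic ny.toNat nx.toNat) (pvCharAt pic y x) then
      (pvSetV s.1 ny.toNat nx.toNat idv, (ny.toNat, nx.toNat) :: s.2)
    else s
  else s

def pvBnd (N y x : Nat) (d : Int × Int) : Prop :=
  0 ≤ (y:Int)+d.1 ∧ (y:Int)+d.1 < (N:Int) ∧ 0 ≤ (x:Int)+d.2 ∧ (x:Int)+d.2 < (N:Int)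

def pvT (y x : Nat) (d : Int × Int) : Nat × Nat := (((y:Int)+d.1).toNat, ((x:Int)+d.2).toNat)

theorem pvMarked_set (v : List (List Int)) (N : Nat) (c : Nat × Nat) (idv : Int)
    (hs : pvShape N v) (hc : pvInB N c) (hidv : 0 ≤ idv) (c' : Nat × Nat) :
    pvMarked (pvSetV v c.1 c.2 idv) c' ↔ (c' = c ∨ pvMarked v c') := by
  by_cases h : c' = c
  · subst h
    unfold pvMarked
    rw [pvGetV_set_same v N c'.1 c'.2 idv hs hc.1 hc.2]
    simp [hidv]
  · have hne : ¬ (c'.1 = c.1 ∧ c'.2 = c.2) := by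
      intro ⟨h1, h2⟩; exact h (Prod.ext h1 h2)
    unfold pvMarked
    rw [pvGetV_set_other v c.1 c.2 idv c'.1 c'.2 hne]
    simp [h]

theorem pvFold_spec (pic : List String) (N : Nat) (p : Char → Char → Bool) (idv : Int)
    (y x : Nat) (hidv : 0 ≤ idv) :
    ∀ (ds : List (Int × Int)) (v : List (List Int)) (st : List (Nat × Nat)),
    pvShape N v →
    (ds.map (fun d => ((y:Int)+d.1, (x:Int)+d.2))).Pairwise (· ≠ ·) →
    ∃ newly : List (Nat × Nat),
      pvShape N (ds.foldl (pvG pic N p idv y x) (v, st)).1 ∧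
      newly.Nodup ∧
      (∀ n ∈ newly, ¬ pvMarked v n ∧ pvInB N n ∧
         ∃ d ∈ ds, pvBnd N y x d ∧ n = pvT y x d ∧
           p (pvCharAt pic n.1 n.2) (pvCharAt pic y x) = true) ∧
      (∀ c, pvMarked (ds.foldl (pvG pic N p idv y x) (v, st)).1 c ↔ pvMarked v c ∨ c ∈ newly) ∧
      (∀ c, c ∈ (ds.foldl (pvG pic N p idv y x) (v, st)).2 ↔ c ∈ st ∨ c ∈ newly) ∧
      ((ds.foldl (pvG pic N p idv y x) (v, st)).2.length = st.length + newly.length) ∧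
      (∀ d ∈ ds, pvBnd N y x d → ¬ pvMarked v (pvT y x d) →
        p (pvCharAt pic (pvT y x d).1 (pvT y x d).2) (pvCharAt pic y x) = true →
        pvT y x d ∈ newly) := by
  intro ds
  induction ds with
  | nil =>
      intro v st hs _
      exact ⟨[], by simpa using hs, by simp, by simp, by simp, by simp, by simp, by simp⟩
  | cons d ds ih =>
      intro v st hs hdist
      rw [List.map_cons, List.pairwise_cons] at hdist
      have hdist' : (ds.map (fun d => ((y:Int)+d.1, (x:Int)+d.2))).Pairwise (· ≠ ·) := hdist.2
      have hdhd : ∀ d' ∈ ds, ((y:Int)+d.1, (x:Int)+d.2) ≠ ((y:Int)+d'.1, (x:Int)+d'.2) := by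
        intro d' hd'
        exact hdist.1 _ (List.mem_map_of_mem hd')
      simp only [List.foldl_cons]
      by_cases hB : pvBnd N y x d
      · have hBc : (0 ≤ (y:Int)+d.1 ∧ (y:Int)+d.1 < (N:Int) ∧ 0 ≤ (x:Int)+d.2 ∧ (x:Int)+d.2 < (N:Int)) := hB
        by_cases hM : pvMarked v (pvT y x d)
        · -- already visited: state unchanged
          have hg : pvG pic N p idv y x (v, st) d = (v, st) := by
            simp only [pvG]
            rw [if_pos hBc, if_pos]
            exact hM
          rw [hg]
          obtain ⟨newly, h1, h2, h3, h4, h5, h6, h7⟩ := ih v st hs hdist'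
          refine ⟨newly, h1, h2, ?_, h4, h5, h6, ?_⟩
          · intro n hn
            obtain ⟨ha, hb, dd, hdd, hrest⟩ := h3 n hn
            exact ⟨ha, hb, dd, List.mem_cons_of_mem _ hdd, hrest⟩
          · intro d' hd' hB' hM' hp'
            rcases List.mem_cons.mp hd' with h | h
            · subst h; exact absurd hM hM'
            · exact h7 d' h hB' hM' hp'
        · by_cases hp : p (pvCharAt pic (pvT y x d).1 (pvT y x d).2) (pvCharAt pic y x) = true
          · -- fresh admissible: mark and push
            have hg : pvG pic N p idv y x (v, st) d =
                (pvSetV v (pvT y x d).1 (pvT y x d).2 idv, pvT y x d :: st) := by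
              simp only [pvG]
              rw [if_pos hBc, if_neg, if_pos
                (show p (pvCharAt pic ((y:Int)+d.1).toNat ((x:Int)+d.2).toNat)
                    (pvCharAt pic y x) = true from hp)]
              · rfl
              · exact hM
            rw [hg]
            have hinB : pvInB N (pvT y x d) := by
              constructor <;> · simp only [pvT]; omega
            have hs1 : pvShape N (pvSetV v (pvT y x d).1 (pvT y x d).2 idv) :=
              pvShape_set _ _ _ _ _ hs
            have hmk : ∀ c, pvMarked (pvSetV v (pvT y x d).1 (pvT y x d).2 idv) c ↔
                (c = pvT y x d ∨ pvMarked v c) :=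
              pvMarked_set v N (pvT y x d) idv hs hinB hidv
            obtain ⟨newly, h1, h2, h3, h4, h5, h6, h7⟩ := ih _ (pvT y x d :: st) hs1 hdist'
            have hTnot : pvT y x d ∉ newly := by
              intro hmem
              exact (h3 _ hmem).1 ((hmk _).mpr (Or.inl rfl))
            refine ⟨pvT y x d :: newly, h1, List.nodup_cons.mpr ⟨hTnot, h2⟩, ?_, ?_, ?_, ?_, ?_⟩
            · intro n hn
              rcases List.mem_cons.mp hn with h | h
              · subst h
                exact ⟨hM, hinB, d, List.mem_cons_self, hB, rfl, hp⟩
              · obtain ⟨ha, hb, dd, hdd, hrest⟩ := h3 n h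
                refine ⟨fun hmv => ha ((hmk n).mpr (Or.inr hmv)), hb, dd,
                  List.mem_cons_of_mem _ hdd, hrest⟩
            · intro c
              rw [h4 c, hmk c]
              simp only [List.mem_cons]
              tauto
            · intro c
              rw [h5 c]
              simp only [List.mem_cons]
              tauto
            · simp only [h6, List.length_cons]
              omega
            · intro d' hd' hB' hM' hp'
              rcases List.mem_cons.mp hd' with h | h
              · subst h; exact List.mem_cons_self
              · have hTne : pvT y x d' ≠ pvT y x d := by
                  intro he
                  apply hdhd d' h
                  have e1 : ((y:Int)+d'.1).toNat = ((y:Int)+d.1).toNat := congrArg Prod.fst he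
                  have e2 : ((x:Int)+d'.2).toNat = ((x:Int)+d.2).toNat := congrArg Prod.snd he
                  obtain ⟨b1, b2, b3, b4⟩ := hB
                  obtain ⟨c1, c2, c3, c4⟩ := hB'
                  have : (y:Int)+d.1 = (y:Int)+d'.1 := by omega
                  have : (x:Int)+d.2 = (x:Int)+d'.2 := by omega
                  simp_all
                have : ¬ pvMarked (pvSetV v (pvT y x d).1 (pvT y x d).2 idv) (pvT y x d') := by
                  rw [hmk]
                  rintro (he | hmv)
                  · exact hTne he
                  · exact hM' hmv
                exact List.mem_cons_of_mem _ (h7 d' h hB' this hp')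
          · -- wrong colour: unchanged
            have hg : pvG pic N p idv y x (v, st) d = (v, st) := by
              simp only [pvG]
              rw [if_pos hBc, if_neg, if_neg
                (show ¬ p (pvCharAt pic ((y:Int)+d.1).toNat ((x:Int)+d.2).toNat)
                    (pvCharAt pic y x) = true from hp)]
              exact hM
            rw [hg]
            obtain ⟨newly, h1, h2, h3, h4, h5, h6, h7⟩ := ih v st hs hdist'
            refine ⟨newly, h1, h2, ?_, h4, h5, h6, ?_⟩
            · intro n hn
              obtain ⟨ha, hb, dd, hdd, hrest⟩ := h3 n hn
              exact ⟨ha, hb, dd, List.mem_cons_of_mem _ hdd, hrest⟩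
            · intro d' hd' hB' hM' hp'
              rcases List.mem_cons.mp hd' with h | h
              · subst h; exact absurd hp' hp
              · exact h7 d' h hB' hM' hp'
      · have hg : pvG pic N p idv y x (v, st) d = (v, st) := by
          unfold pvG
          rw [if_neg]
          exact hB
        rw [hg]
        obtain ⟨newly, h1, h2, h3, h4, h5, h6, h7⟩ := ih v st hs hdist'
        refine ⟨newly, h1, h2, ?_, h4, h5, h6, ?_⟩
        · intro n hn
          obtain ⟨ha, hb, dd, hdd, hrest⟩ := h3 n hn
          exact ⟨ha, hb, dd, List.mem_cons_of_mem _ hdd, hrest⟩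
        · intro d' hd' hB' hM' hp'
          rcases List.mem_cons.mp hd' with h | h
          · subst h; exact absurd hB' hB
          · exact h7 d' h hB' hM' hp'

-- ===== reachability utilities =====
theorem pvReach_mono (pic : List String) (N : Nat) (p : Char → Char → Bool)
    (U1 U2 : Nat × Nat → Prop) (hU : ∀ b, U1 b → U2 b) :
    ∀ a b, pvReach pic N p U1 a b → pvReach pic N p U2 a b := by
  intro a b h
  refine Relation.ReflTransGen.mono ?_ h
  intro u w hw
  exact ⟨hw.1, hw.2.1, hU _ hw.2.2.1, hw.2.2.2⟩

theorem pvReach_target (pic : List String) (N : Nat) (p : Char → Char → Bool)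
    (U : Nat × Nat → Prop) (a b : Nat × Nat) (h : pvReach pic N p U a b) :
    b = a ∨ U b := by
  induction h with
  | refl => exact Or.inl rfl
  | tail _ hbc _ => exact Or.inr hbc.2.2.1

def pvDs4 : List (Int × Int) := [(-1,0),(1,0),(0,-1),(0,1)]

theorem pvDs4_dist (y x : Nat) :
    (pvDs4.map (fun d => ((y:Int)+d.1, (x:Int)+d.2))).Pairwise (· ≠ ·) := by
  simp only [pvDs4, List.map_cons, List.map_nil, List.pairwise_cons, List.mem_cons]
  refine ⟨?_, ?_, ?_, by simp⟩ <;>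
    · intro a ha
      rcases ha with h | h | h | h <;> (try subst h) <;> simp_all [Prod.ext_iff] <;> omega

theorem pvT_step (pic : List String) (N : Nat) (p : Char → Char → Bool)
    (y x : Nat) (hy : y < N) (hx : x < N) (U : Nat × Nat → Prop) (d : Int × Int)
    (hd : d ∈ pvDs4) (hB : pvBnd N y x d) (hU : U (pvT y x d))
    (hp : p (pvCharAt pic (pvT y x d).1 (pvT y x d).2) (pvCharAt pic y x) = true) :
    pvStep pic N p U (y, x) (pvT y x d) := by
  obtain ⟨b1, b2, b3, b4⟩ := hB
  refine ⟨⟨hy, hx⟩, ⟨by simp only [pvT]; omega, by simp only [pvT]; omega⟩, hU, ?_, hp⟩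
  simp only [pvDs4, List.mem_cons, List.not_mem_nil, or_false] at hd
  rcases hd with h | h | h | h <;> subst h <;> simp [pvNbr, pvT] <;> omega

theorem pvStep_delta (pic : List String) (N : Nat) (p : Char → Char → Bool)
    (y x : Nat) (U : Nat × Nat → Prop) (c : Nat × Nat)
    (h : pvStep pic N p U (y, x) c) :
    ∃ d ∈ pvDs4, pvBnd N y x d ∧ c = pvT y x d := by
  obtain ⟨⟨hy, hx⟩, ⟨hc1, hc2⟩, _, hnbr, _⟩ := h
  rcases hnbr with ⟨h1, h2 | h2⟩ | ⟨h1, h2 | h2⟩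
  · refine ⟨(0,1), by simp [pvDs4], by simp [pvBnd]; omega, ?_⟩
    apply Prod.ext <;> simp [pvT] <;> omega
  · refine ⟨(0,-1), by simp [pvDs4], by simp [pvBnd]; omega, ?_⟩
    apply Prod.ext <;> simp [pvT] <;> omega
  · refine ⟨(1,0), by simp [pvDs4], by simp [pvBnd]; omega, ?_⟩
    apply Prod.ext <;> simp [pvT] <;> omega
  · refine ⟨(-1,0), by simp [pvDs4], by simp [pvBnd]; omega, ?_⟩
    apply Prod.ext <;> simp [pvT] <;> omega

-- ===== measure =====
def pvUnm (N : Nat) (v : List (List Int)) : Finset (Nat × Nat) :=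
  (Finset.range N ×ˢ Finset.range N).filter (fun c => ¬ pvMarked v c)

def pvMeasure (N : Nat) (v : List (List Int)) (st : List (Nat × Nat)) : Nat :=
  st.length + 2 * (pvUnm N v).card

theorem pvMarkLoop_cons (pic : List String) (N : Nat) (p : Char → Char → Bool) (idv : Int)
    (f : Nat) (v : List (List Int)) (y x : Nat) (rest : List (Nat × Nat)) :
    pvMarkLoop pic N p idv (f+1) v ((y,x) :: rest) =
    pvMarkLoop pic N p idv f (pvDs4.foldl (pvG pic N p idv y x) (v, rest)).1
      (pvDs4.foldl (pvG pic N p idv y x) (v, rest)).2 := rfl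

theorem pvMarkLoop_spec (pic : List String) (N : Nat) (p : Char → Char → Bool) (idv : Int)
    (hidv : 0 ≤ idv) :
    ∀ (fuel : Nat) (v : List (List Int)) (st : List (Nat × Nat)),
    pvShape N v → (∀ c ∈ st, pvInB N c ∧ pvMarked v c) →
    pvMeasure N v st < fuel →
    pvShape N (pvMarkLoop pic N p idv fuel v st) ∧
    ∀ c, pvMarked (pvMarkLoop pic N p idv fuel v st) c ↔
      (pvMarked v c ∨ ∃ s ∈ st, pvReach pic N p (fun b => ¬ pvMarked v b) s c) := by
  intro fuel
  induction fuel with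
  | zero => intro v st _ _ hm; omega
  | succ f ih =>
    intro v st hs hst hm
    rcases st with _ | ⟨⟨y, x⟩, rest⟩
    · refine ⟨hs, ?_⟩
      intro c
      simp [pvMarkLoop]
    ·
        obtain ⟨⟨hy, hx⟩, hyxm⟩ := hst (y,x) List.mem_cons_self
        obtain ⟨newly, hsh1, hnd, hnew, hmk, hstk, hlen, hcomp⟩ :=
          pvFold_spec pic N p idv y x hidv pvDs4 v rest hs (pvDs4_dist y x)
        rw [pvMarkLoop_cons]
        set v1 := (pvDs4.foldl (pvG pic N p idv y x) (v, rest)).1 with hv1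
        set st1 := (pvDs4.foldl (pvG pic N p idv y x) (v, rest)).2 with hst1
        have hnewstep : ∀ n ∈ newly, pvStep pic N p (fun b => ¬ pvMarked v b) (y,x) n := by
          intro n hn
          obtain ⟨hfr, hnb, d, hd, hB, hT, hp'⟩ := hnew n hn
          subst hT
          exact pvT_step pic N p y x hy hx _ d hd hB hfr hp'
        have hcomp' : ∀ c, pvStep pic N p (fun b => ¬ pvMarked v b) (y,x) c → c ∈ newly := by
          intro c hstep
          obtain ⟨d, hd, hB, hT⟩ := pvStep_delta pic N p y x _ c hstep
          subst hT
          exact hcomp d hd hB hstep.2.2.1 hstep.2.2.2.2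
        have hstinv : ∀ c ∈ st1, pvInB N c ∧ pvMarked v1 c := by
          intro c hc
          rcases (hstk c).mp hc with h | h
          · exact ⟨(hst c (List.mem_cons_of_mem _ h)).1,
              (hmk c).mpr (Or.inl (hst c (List.mem_cons_of_mem _ h)).2)⟩
          · exact ⟨(hnew c h).2.1, (hmk c).mpr (Or.inr h)⟩
        have hsub : newly.toFinset ⊆ pvUnm N v := by
          intro c hc
          rw [List.mem_toFinset] at hc
          obtain ⟨hfr, ⟨h1, h2⟩, _⟩ := hnew c hc
          simp only [pvUnm, Finset.mem_filter, Finset.mem_product, Finset.mem_range]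
          exact ⟨⟨h1, h2⟩, hfr⟩
        have hunm : pvUnm N v1 = pvUnm N v \ newly.toFinset := by
          ext c
          simp only [pvUnm, Finset.mem_sdiff, Finset.mem_filter, Finset.mem_product,
            Finset.mem_range, List.mem_toFinset]
          constructor
          · intro ⟨hb, hnm⟩
            have := fun h => hnm ((hmk c).mpr h)
            exact ⟨⟨hb, fun hmv => this (Or.inl hmv)⟩, fun hn => this (Or.inr hn)⟩
          · intro ⟨⟨hb, hnm⟩, hnn⟩
            refine ⟨hb, fun hm1 => ?_⟩
            rcases (hmk c).mp hm1 with h | h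
            · exact hnm h
            · exact hnn h
        have hcard : (pvUnm N v1).card + newly.length = (pvUnm N v).card := by
          rw [hunm, Finset.card_sdiff]
          have h1 : newly.toFinset ∩ pvUnm N v = newly.toFinset := Finset.inter_eq_left.mpr hsub
          rw [h1]
          have h2 : newly.toFinset.card = newly.length := List.toFinset_card_of_nodup hnd
          have h3 : newly.toFinset.card ≤ (pvUnm N v).card := Finset.card_le_card hsub
          omega
        have hmeas : pvMeasure N v1 st1 < f := by
          have h0 : pvMeasure N v ((y, x) :: rest) < f + 1 := hm
          simp only [pvMeasure, List.length_cons] at h0 ⊢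
          have h4 : newly.length ≤ (pvUnm N v).card := by
            rw [← List.toFinset_card_of_nodup hnd]
            exact Finset.card_le_card hsub
          omega
        obtain ⟨hsh', hiff'⟩ := ih v1 st1 hsh1 hstinv hmeas
        refine ⟨hsh', ?_⟩
        intro c
        rw [hiff' c]
        have hmono : ∀ a b, pvReach pic N p (fun b => ¬ pvMarked v1 b) a b →
            pvReach pic N p (fun b => ¬ pvMarked v b) a b := by
          refine pvReach_mono pic N p _ _ ?_
          intro b hb hbv
          exact hb ((hmk b).mpr (Or.inl hbv))
        constructor
        · intro h
          rcases h with hm1 | ⟨t, ht, hr⟩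
          · rcases (hmk c).mp hm1 with hmv | hnewc
            · exact Or.inl hmv
            · exact Or.inr ⟨(y,x), List.mem_cons_self,
                Relation.ReflTransGen.single (hnewstep c hnewc)⟩
          · rcases (hstk t).mp ht with htr | htn
            · exact Or.inr ⟨t, List.mem_cons_of_mem _ htr, hmono _ _ hr⟩
            · exact Or.inr ⟨(y,x), List.mem_cons_self,
                Relation.ReflTransGen.head (hnewstep t htn) (hmono _ _ hr)⟩
        · intro h
          rcases h with hmv | ⟨s0, hs0, hchain⟩
          · exact Or.inl ((hmk c).mpr (Or.inl hmv))
          · induction hchain with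
            | refl => exact Or.inl ((hmk s0).mpr (Or.inl (hst s0 hs0).2))
            | @tail b c' hab hbc ihh =>
                by_cases hc1 : pvMarked v1 c'
                · exact Or.inl hc1
                · rcases ihh with hb1 | ⟨t, ht, hrt⟩
                  · rcases (hmk b).mp hb1 with hbv | hbn
                    · rcases pvReach_target pic N p _ s0 b hab with he | hub
                      · rcases List.mem_cons.mp hs0 with h0 | h0
                        · have hbc' : pvStep pic N p (fun bb => ¬ pvMarked v bb) (y, x) c' := by
                            rw [he, h0] at hbc; exact hbc
                          exact absurd ((hmk c').mpr (Or.inr (hcomp' c' hbc'))) hc1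
                        · exact Or.inr ⟨b, (hstk b).mpr (Or.inl (by rw [he]; exact h0)),
                            Relation.ReflTransGen.single
                              ⟨hbc.1, hbc.2.1, hc1, hbc.2.2.2.1, hbc.2.2.2.2⟩⟩
                      · exact absurd hbv hub
                    · exact Or.inr ⟨b, (hstk b).mpr (Or.inr hbn),
                        Relation.ReflTransGen.single
                          ⟨hbc.1, hbc.2.1, hc1, hbc.2.2.2.1, hbc.2.2.2.2⟩⟩
                  · exact Or.inr ⟨t, ht,
                      hrt.tail ⟨hbc.1, hbc.2.1, hc1, hbc.2.2.2.1, hbc.2.2.2.2⟩⟩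

-- ===== connectivity =====
theorem pvConn_symm (pic : List String) (N : Nat) (p : Char → Char → Bool)
    (hp : ∀ a b, p a b = p b a) :
    ∀ a b, pvConn pic N p a b → pvConn pic N p b a := by
  intro a b h
  induction h with
  | refl => exact Relation.ReflTransGen.refl
  | @tail b' c' hab hbc ihh =>
      refine Relation.ReflTransGen.trans (Relation.ReflTransGen.single ?_) ihh
      exact ⟨hbc.2.1, hbc.1, trivial, by
        rcases hbc.2.2.2.1 with ⟨h1, h2⟩ | ⟨h1, h2⟩
        · exact Or.inl ⟨h1.symm, h2.symm⟩
        · exact Or.inr ⟨h1.symm, h2.symm⟩, by rw [hp]; exact hbc.2.2.2.2⟩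

theorem pvConn_avoid (pic : List String) (N : Nat) (p : Char → Char → Bool)
    (v : List (List Int)) (s : Nat × Nat)
    (hdis : ∀ d, pvConn pic N p s d → ¬ pvMarked v d) :
    ∀ c, pvConn pic N p s c →
      c = s ∨ pvReach pic N p (fun b => ¬ pvMarked v b ∧ b ≠ s) s c := by
  intro c h
  induction h with
  | refl => exact Or.inl rfl
  | @tail b c' hab hbc ihh =>
      by_cases hc : c' = s
      · exact Or.inl hc
      · have hUc : ¬ pvMarked v c' ∧ c' ≠ s := ⟨hdis c' (hab.tail hbc), hc⟩
        rcases ihh with he | hr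
        · subst he
          exact Or.inr (Relation.ReflTransGen.single
            ⟨hbc.1, hbc.2.1, hUc, hbc.2.2.2.1, hbc.2.2.2.2⟩)
        · exact Or.inr (hr.tail ⟨hbc.1, hbc.2.1, hUc, hbc.2.2.2.1, hbc.2.2.2.2⟩)

-- ===== the init matrix and mark() =====
def pvInit (N : Nat) : List (List Int) :=
  (List.range N).map (fun _ => (List.range N).map (fun _ => (-1:Int)))

theorem pvInit_shape (N : Nat) : pvShape N (pvInit N) := by
  constructor
  · simp [pvInit]
  · intro r hr
    simp only [pvInit, List.mem_map] at hr
    obtain ⟨_, _, h⟩ := hr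
    simp [← h]

theorem pvInit_unmarked (N : Nat) : ∀ c, ¬ pvMarked (pvInit N) c := by
  have hrow : ∀ x : Nat, ((List.range N).map (fun _ => (-1:Int))).getD x (-1) = -1 := by
    intro x
    rw [List.getD_eq_getElem?_getD, List.getElem?_map]
    cases (List.range N)[x]? <;> simp
  intro c
  unfold pvMarked pvGetV pvInit
  rcases Nat.lt_or_ge c.1 N with hy | hy
  · rw [List.getD_eq_getElem?_getD
      (l := (List.range N).map fun _ => (List.range N).map fun _ => (-1:Int)),
      List.getElem?_map, List.getElem?_range hy]
    simp only [Option.map_some, Option.getD_some]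
    rw [hrow]
    omega
  · rw [List.getD_eq_getElem?_getD
      (l := (List.range N).map fun _ => (List.range N).map fun _ => (-1:Int)),
      List.getElem?_eq_none (by simpa using hy)]
    simp

theorem pvMark_spec (pic : List String) (N : Nat) (p : Char → Char → Bool)
    (v : List (List Int)) (y0 x0 : Nat) (idv : Int)
    (hs : pvShape N v) (hb : pvInB N (y0, x0)) (hidv : 0 ≤ idv)
    (hdis : ∀ d, pvConn pic N p (y0, x0) d → ¬ pvMarked v d) :
    pvShape N (pvMark pic N p y0 x0 idv v) ∧
    ∀ c, pvMarked (pvMark pic N p y0 x0 idv v) c ↔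
      (pvMarked v c ∨ pvConn pic N p (y0, x0) c) := by
  have hfr : ¬ pvMarked v (y0, x0) := hdis _ Relation.ReflTransGen.refl
  set v0 := pvSetV v y0 x0 idv with hv0
  have hs0 : pvShape N v0 := pvShape_set v N y0 x0 idv hs
  have hmk0 : ∀ c, pvMarked v0 c ↔ (c = (y0, x0) ∨ pvMarked v c) :=
    pvMarked_set v N (y0, x0) idv hs hb hidv
  have hstinv : ∀ c ∈ [((y0 : Nat), (x0 : Nat))], pvInB N c ∧ pvMarked v0 c := by
    intro c hc
    rw [List.mem_singleton] at hc
    subst hc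
    exact ⟨hb, (hmk0 _).mpr (Or.inl rfl)⟩
  have hmemseed : (y0, x0) ∈ Finset.range N ×ˢ Finset.range N := by
    simp only [Finset.mem_product, Finset.mem_range]
    exact hb
  have hcard : (pvUnm N v0).card < N * N := by
    have hsub : pvUnm N v0 ⊆ (Finset.range N ×ˢ Finset.range N).erase (y0, x0) := by
      intro c hc
      simp only [pvUnm, Finset.mem_filter] at hc
      rw [Finset.mem_erase]
      refine ⟨?_, hc.1⟩
      intro he
      subst he
      exact hc.2 ((hmk0 _).mpr (Or.inl rfl))
    have h1 := Finset.card_le_card hsub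
    have h2 := Finset.card_erase_of_mem hmemseed
    have h3 : (Finset.range N ×ˢ Finset.range N).card = N * N := by
      simp [Finset.card_product]
    have h4 : 0 < (Finset.range N ×ˢ Finset.range N).card := Finset.card_pos.mpr ⟨_, hmemseed⟩
    omega
  have hmeas : pvMeasure N v0 [((y0 : Nat), (x0 : Nat))] < 2*N*N + 1 := by
    have h5 : 2*N*N = N*N + N*N := by ring
    simp only [pvMeasure, List.length_singleton]
    omega
  obtain ⟨hsh, hiff⟩ := pvMarkLoop_spec pic N p idv hidv (2*N*N+1) v0 [(y0, x0)] hs0 hstinv hmeas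
  refine ⟨hsh, ?_⟩
  intro c
  unfold pvMark
  rw [show pvMarkLoop pic N p idv (2*N*N+1) (pvSetV v y0 x0 idv) [(y0,x0)] =
    pvMarkLoop pic N p idv (2*N*N+1) v0 [(y0,x0)] from rfl, hiff c]
  constructor
  · intro h
    rcases h with h0 | ⟨s, hsmem, hr⟩
    · rcases (hmk0 c).mp h0 with he | hmv
      · subst he; exact Or.inr Relation.ReflTransGen.refl
      · exact Or.inl hmv
    · rw [List.mem_singleton] at hsmem
      subst hsmem
      refine Or.inr ?_
      refine pvReach_mono pic N p _ _ ?_ _ _ hr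
      intro b _
      trivial
  · intro h
    rcases h with hmv | hconn
    · exact Or.inl ((hmk0 c).mpr (Or.inr hmv))
    · rcases pvConn_avoid pic N p v (y0, x0) hdis c hconn with he | hr
      · subst he
        exact Or.inl ((hmk0 _).mpr (Or.inl rfl))
      · refine Or.inr ⟨(y0, x0), List.mem_singleton.mpr rfl, ?_⟩
        refine pvReach_mono pic N p _ _ ?_ _ _ hr
        intro b hbb
        intro hm1
        rcases (hmk0 b).mp hm1 with he | hmv
        · exact hbb.2 he
        · exact hbb.1 hmv

-- ===== the scan order =====
def pvCells (N : Nat) : List (Nat × Nat) :=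
  (List.range N).flatMap (fun y => (List.range N).map (fun x => (y, x)))

def pvIdx (N : Nat) (c : Nat × Nat) : Nat := c.1 * N + c.2

def pvFirst (pic : List String) (N : Nat) (p : Char → Char → Bool) (c : Nat × Nat) : Prop :=
  ∀ j, pvInB N j → pvIdx N j < pvIdx N c → ¬ pvConn pic N p j c

noncomputable def pvDecFirst (pic : List String) (N : Nat) (p : Char → Char → Bool) :
    (Nat × Nat) → Bool :=
  fun c => @decide (pvFirst pic N p c) (Classical.propDecidable _)

theorem pvCells_mem (N : Nat) (j : Nat × Nat) : j ∈ pvCells N ↔ pvInB N j := by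
  simp only [pvCells, List.mem_flatMap, List.mem_map, List.mem_range, pvInB]
  constructor
  · rintro ⟨y, hy, x, hx, rfl⟩; exact ⟨hy, hx⟩
  · rintro ⟨h1, h2⟩; exact ⟨j.1, h1, j.2, h2, Prod.mk.eta⟩

theorem pvCells_sorted (N : Nat) :
    (pvCells N).Pairwise (fun a b => pvIdx N a < pvIdx N b) := by
  unfold pvCells
  rw [List.flatMap_def, List.pairwise_flatten]
  constructor
  · intro l hl
    simp only [List.mem_map, List.mem_range] at hl
    obtain ⟨y, hy, rfl⟩ := hl
    rw [List.pairwise_map]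
    refine List.Pairwise.imp ?_ List.pairwise_lt_range
    intro a b hab
    simp only [pvIdx]
    omega
  · rw [List.pairwise_map]
    refine List.Pairwise.imp ?_ List.pairwise_lt_range
    intro y1 y2 h12 a ha b hb
    simp only [List.mem_map, List.mem_range] at ha hb
    obtain ⟨x1, hx1, rfl⟩ := ha
    obtain ⟨x2, hx2, rfl⟩ := hb
    simp only [pvIdx]
    have h1 : (y1 + 1) * N ≤ y2 * N := Nat.mul_le_mul_right N h12
    have h2 : (y1 + 1) * N = y1 * N + N := by ring
    omega

theorem pvCells_split (N : Nat) (pre : List (Nat × Nat)) (c : Nat × Nat)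
    (suf : List (Nat × Nat)) (h : pvCells N = pre ++ c :: suf) :
    ∀ j, j ∈ pre ↔ (pvInB N j ∧ pvIdx N j < pvIdx N c) := by
  have hsort := pvCells_sorted N
  rw [h, List.pairwise_append] at hsort
  obtain ⟨hpre, hcs, hcross⟩ := hsort
  rw [List.pairwise_cons] at hcs
  intro j
  constructor
  · intro hj
    refine ⟨(pvCells_mem N j).mp (by rw [h]; exact List.mem_append_left _ hj), ?_⟩
    exact hcross j hj c List.mem_cons_self
  · rintro ⟨hB, hidx⟩
    have hmem : j ∈ pre ++ c :: suf := by rw [← h]; exact (pvCells_mem N j).mpr hB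
    rcases List.mem_append.mp hmem with h0 | h0
    · exact h0
    · rcases List.mem_cons.mp h0 with h1 | h1
      · subst h1; omega
      · have := hcs.1 j h1; omega

def pvScanStep (pic : List String) (N : Nat) (p : Char → Char → Bool)
    (s : Int × List (List Int)) (c : Nat × Nat) : Int × List (List Int) :=
  if 0 ≤ pvGetV s.2 c.1 c.2 then s else (s.1 + 1, pvMark pic N p c.1 c.2 s.1 s.2)

theorem pvScan_eq (pic : List String) (N : Nat) (p : Char → Char → Bool) :
    pvScan pic N p = (pvCells N).foldl (pvScanStep pic N p) (0, pvInit N) := by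
  unfold pvScan pvCells pvInit pvScanStep
  rw [List.foldl_flatMap]
  simp only [List.foldl_map]

theorem pvScanLoop (pic : List String) (N : Nat) (p : Char → Char → Bool)
    (hp : ∀ a b, p a b = p b a) :
    ∀ (suf pre : List (Nat × Nat)) (num : Int) (v : List (List Int)),
    pvCells N = pre ++ suf →
    pvShape N v →
    (∀ c, pvMarked v c ↔ ∃ j ∈ pre, pvConn pic N p j c) →
    num = (pre.countP (pvDecFirst pic N p) : Int) →
    (suf.foldl (pvScanStep pic N p) (num, v)).1 =
      ((pre ++ suf).countP (pvDecFirst pic N p) : Int) := by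
  intro suf
  induction suf with
  | nil =>
      intro pre num v _ _ _ hnum
      simpa using hnum
  | cons c suf ih =>
      intro pre num v hcells hs hmkinv hnum
      have hcinB : pvInB N c := (pvCells_mem N c).mp
        (by rw [hcells]; exact List.mem_append_right _ List.mem_cons_self)
      have hchar := pvCells_split N pre c suf hcells
      have hassoc : pre ++ c :: suf = (pre ++ [c]) ++ suf := by simp
      rw [hassoc]
      rw [hassoc] at hcells
      simp only [List.foldl_cons]
      by_cases hm : pvMarked v c
      · have hstep : pvScanStep pic N p (num, v) c = (num, v) := by
          unfold pvScanStep
          rw [if_pos (show 0 ≤ pvGetV (num, v).2 c.1 c.2 from hm)]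
        rw [hstep]
        have hcnt : pvDecFirst pic N p c = false := by
          unfold pvDecFirst
          refine @decide_eq_false _ (Classical.propDecidable _) ?_
          intro hF
          obtain ⟨j, hj, hconn⟩ := (hmkinv c).mp hm
          exact hF j ((hchar j).mp hj).1 ((hchar j).mp hj).2 hconn
        refine ih (pre ++ [c]) num v hcells hs ?_ ?_
        · intro d
          rw [hmkinv d]
          constructor
          · rintro ⟨j, hj, hc⟩
            exact ⟨j, List.mem_append_left _ hj, hc⟩
          · rintro ⟨j, hj, hc⟩
            rcases List.mem_append.mp hj with h0 | h0
            · exact ⟨j, h0, hc⟩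
            · rw [List.mem_singleton] at h0
              subst h0
              obtain ⟨j0, hj0, hj0c⟩ := (hmkinv j).mp hm
              exact ⟨j0, hj0, hj0c.trans hc⟩
        · rw [hnum, List.countP_append]
          simp [hcnt, List.countP_cons]
      · have hstep : pvScanStep pic N p (num, v) c =
            (num + 1, pvMark pic N p c.1 c.2 num v) := by
          unfold pvScanStep
          rw [if_neg (show ¬ 0 ≤ pvGetV (num, v).2 c.1 c.2 from hm)]
        rw [hstep]
        have hdis : ∀ d, pvConn pic N p c d → ¬ pvMarked v d := by
          intro d hcd hmd
          obtain ⟨j, hj, hjd⟩ := (hmkinv d).mp hmd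
          exact hm ((hmkinv c).mpr ⟨j, hj, hjd.trans (pvConn_symm pic N p hp c d hcd)⟩)
        have hnum0 : 0 ≤ num := by
          rw [hnum]
          exact_mod_cast Nat.zero_le _
        obtain ⟨hs', hmk'⟩ := pvMark_spec pic N p v c.1 c.2 num hs
          (by rw [Prod.mk.eta]; exact hcinB) hnum0
          (by rw [Prod.mk.eta]; exact hdis)
        have hF : pvFirst pic N p c := by
          intro j hjB hjidx hconn
          exact hm ((hmkinv c).mpr ⟨j, (hchar j).mpr ⟨hjB, hjidx⟩, hconn⟩)
        have hcnt : pvDecFirst pic N p c = true := by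
          unfold pvDecFirst
          exact @decide_eq_true _ (Classical.propDecidable _) hF
        refine ih (pre ++ [c]) (num + 1) (pvMark pic N p c.1 c.2 num v) hcells hs' ?_ ?_
        · intro d
          rw [hmk' d, hmkinv d, Prod.mk.eta]
          constructor
          · rintro (⟨j, hj, hc⟩ | hc)
            · exact ⟨j, List.mem_append_left _ hj, hc⟩
            · exact ⟨c, List.mem_append_right _ List.mem_cons_self, hc⟩
          · rintro ⟨j, hj, hc⟩
            rcases List.mem_append.mp hj with h0 | h0
            · exact Or.inl ⟨j, h0, hc⟩
            · rw [List.mem_singleton] at h0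
              subst h0
              exact Or.inr hc
        · rw [hnum, List.countP_append]
          simp [hcnt, List.countP_cons]
          try push_cast
          try ring

theorem pvScanA_count (pic : List String) (N : Nat) (p : Char → Char → Bool)
    (hp : ∀ a b, p a b = p b a) :
    (pvScan pic N p).1 = ((pvCells N).countP (pvDecFirst pic N p) : Int) := by
  rw [pvScan_eq]
  have := pvScanLoop pic N p hp (pvCells N) [] 0 (pvInit N) (by simp) (pvInit_shape N)
    (by
      intro c
      constructor
      · intro hmm
        exact absurd hmm (pvInit_unmarked N c)
      · rintro ⟨j, hj, -⟩
        simp at hj) (by simp)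
  simpa using this

-- ===== union-find: roots =====
def pvRootF (N : Nat) (par : List Int) (i : Nat) : Nat := pvUfFind par (N*N) i

def pvPinv (N : Nat) (par : List Int) : Prop :=
  par.length = N*N ∧ ∀ i, i < N*N → ∃ k : Nat, par[i]? = some ((k:Nat):Int) ∧ k ≤ i

theorem pvUfFind_fuel (N : Nat) (par : List Int) (hp : pvPinv N par) :
    ∀ i, i < N*N → ∀ f1 f2, i < f1 → i < f2 → pvUfFind par f1 i = pvUfFind par f2 i := by
  intro i
  induction i using Nat.strong_induction_on with
  | _ i ih =>
    intro hiN f1 f2 h1 h2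
    obtain ⟨k, hk, hki⟩ := hp.2 i hiN
    cases f1 with
    | zero => omega
    | succ a =>
      cases f2 with
      | zero => omega
      | succ b =>
        simp only [pvUfFind]
        rw [List.getD_eq_getElem?_getD, hk]
        simp only [Option.getD_some]
        by_cases hke : ((k:Nat):Int) = (i:Int)
        · rw [if_pos hke, if_pos hke]
        · rw [if_neg hke, if_neg hke]
          have hklt : k < i := by
            rcases Nat.lt_or_ge k i with h | h
            · exact h
            · exfalso; apply hke; have : k = i := by omega
              rw [this]
          have htn : ((k:Nat):Int).toNat = k := by omega
          rw [htn]
          exact ih k hklt (by omega) a b (by omega) (by omega)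

theorem pvRoot_fix_of (N : Nat) (par : List Int) (hp : pvPinv N par) (i : Nat)
    (hiN : i < N*N) (hk : par[i]? = some ((i:Nat):Int)) : pvRootF N par i = i := by
  unfold pvRootF
  have h0 : 0 < N*N := by omega
  obtain ⟨m, hm⟩ : ∃ m, N*N = m+1 := ⟨N*N-1, by omega⟩
  rw [hm]
  simp only [pvUfFind]
  rw [List.getD_eq_getElem?_getD, hk]
  simp

theorem pvRoot_step (N : Nat) (par : List Int) (hp : pvPinv N par) (i k : Nat)
    (hiN : i < N*N) (hk : par[i]? = some ((k:Nat):Int)) (hki : k < i) :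
    pvRootF N par i = pvRootF N par k := by
  unfold pvRootF
  obtain ⟨m, hm⟩ : ∃ m, N*N = m+1 := ⟨N*N-1, by omega⟩
  have hstep : pvUfFind par (m+1) i = (if par.getD i (Int.ofNat i) = (i:Int) then i
      else pvUfFind par m (par.getD i (Int.ofNat i)).toNat) := rfl
  rw [hm, hstep, List.getD_eq_getElem?_getD, hk]
  simp only [Option.getD_some]
  rw [if_neg (by omega)]
  have htn : ((k:Nat):Int).toNat = k := by omega
  rw [htn]
  exact pvUfFind_fuel N par hp k (by omega) m (m+1) (by omega) (by omega)

theorem pvRoot_props (N : Nat) (par : List Int) (hp : pvPinv N par) :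
    ∀ i, i < N*N → pvRootF N par i ≤ i ∧
      par[pvRootF N par i]? = some ((pvRootF N par i : Nat) : Int) := by
  intro i
  induction i using Nat.strong_induction_on with
  | _ i ih =>
    intro hiN
    obtain ⟨k, hk, hki⟩ := hp.2 i hiN
    by_cases hke : k = i
    · subst hke
      rw [pvRoot_fix_of N par hp k hiN hk]
      exact ⟨le_refl _, hk⟩
    · have hklt : k < i := by omega
      rw [pvRoot_step N par hp i k hiN hk hklt]
      obtain ⟨h1, h2⟩ := ih k hklt (by omega)
      exact ⟨by omega, h2⟩

theorem pvRoot_id (N : Nat) (par : List Int) (hp : pvPinv N par) (i : Nat) (hiN : i < N*N) :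
    par[i]? = some ((i:Nat):Int) ↔ pvRootF N par i = i := by
  constructor
  · exact pvRoot_fix_of N par hp i hiN
  · intro h
    obtain ⟨k, hk, hki⟩ := hp.2 i hiN
    by_cases hke : k = i
    · subst hke; exact hk
    · exfalso
      have hklt : k < i := by omega
      rw [pvRoot_step N par hp i k hiN hk hklt] at h
      have := (pvRoot_props N par hp k (by omega)).1
      omega

theorem pvRoot_set (N : Nat) (par : List Int) (hp : pvPinv N par) (a b : Nat)
    (hba : b < a) (haN : a < N*N)
    (hafix : par[a]? = some ((a:Nat):Int)) (hbfix : par[b]? = some ((b:Nat):Int)) :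
    pvPinv N (par.set a ((b:Nat):Int)) ∧
    ∀ i, i < N*N → pvRootF N (par.set a ((b:Nat):Int)) i =
      (if pvRootF N par i = a then b else pvRootF N par i) := by
  have hlen : (par.set a ((b:Nat):Int)).length = N*N := by
    simp [hp.1]
  have hentry : ∀ i, i < N*N → (par.set a ((b:Nat):Int))[i]? =
      (if i = a then some ((b:Nat):Int) else par[i]?) := by
    intro i hiN
    by_cases hia : i = a
    · subst hia
      rw [if_pos rfl, List.getElem?_set_self (by rw [hp.1]; omega)]
    · rw [if_neg hia, List.getElem?_set_ne (fun h => hia h.symm)]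
  have hp' : pvPinv N (par.set a ((b:Nat):Int)) := by
    refine ⟨hlen, ?_⟩
    intro i hiN
    rw [hentry i hiN]
    by_cases hia : i = a
    · subst hia
      rw [if_pos rfl]
      exact ⟨b, rfl, by omega⟩
    · rw [if_neg hia]
      exact hp.2 i hiN
  refine ⟨hp', ?_⟩
  intro i
  induction i using Nat.strong_induction_on with
  | _ i ih =>
    intro hiN
    by_cases hia : i = a
    · rw [hia]
      have he : (par.set a ((b:Nat):Int))[a]? = some ((b:Nat):Int) := by
        rw [hentry a haN, if_pos rfl]
      have heb : (par.set a ((b:Nat):Int))[b]? = par[b]? := by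
        rw [hentry b (by omega), if_neg (by omega)]
      rw [pvRoot_step N _ hp' a b haN he hba,
        pvRoot_fix_of N _ hp' b (by omega) (by rw [heb]; exact hbfix),
        pvRoot_fix_of N par hp a haN hafix, if_pos rfl]
    · obtain ⟨k, hk, hki⟩ := hp.2 i hiN
      have he : (par.set a ((b:Nat):Int))[i]? = par[i]? := by
        rw [hentry i hiN, if_neg hia]
      by_cases hke : k = i
      · subst hke
        rw [pvRoot_fix_of N _ hp' k hiN (by rw [he]; exact hk),
          pvRoot_fix_of N par hp k hiN hk, if_neg hia]
      · have hklt : k < i := by omega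
        rw [pvRoot_step N _ hp' i k hiN (by rw [he]; exact hk) hklt,
          pvRoot_step N par hp i k hiN hk hklt]
        exact ih k hklt (by omega)

theorem pvUnion_spec (N : Nat) (par : List Int) (u w : Nat) (hp : pvPinv N par)
    (hu : u < N*N) (hw : w < N*N) :
    pvPinv N (pvUnion N par u w) ∧
    ∀ i, i < N*N → pvRootF N (pvUnion N par u w) i =
      (if pvRootF N par u = pvRootF N par w then pvRootF N par i
       else if pvRootF N par i = max (pvRootF N par u) (pvRootF N par w)
         then min (pvRootF N par u) (pvRootF N par w) else pvRootF N par i) := by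
  set a := pvRootF N par u with hadef
  set b := pvRootF N par w with hbdef
  have hap := pvRoot_props N par hp u hu
  have hbp := pvRoot_props N par hp w hw
  have hun : pvUnion N par u w = if a = b then par else par.set (max a b) ((min a b : Nat) : Int) := by
    unfold pvUnion
    rfl
  by_cases hab : a = b
  · rw [hun, if_pos hab]
    refine ⟨hp, ?_⟩
    intro i hiN
    rw [if_pos hab]
  · rw [hun, if_neg hab]
    have hmaxfix : par[(max a b : Nat)]? = some ((max a b : Nat) : Int) := by
      rcases Nat.le_total a b with h | h
      · rw [Nat.max_eq_right h]; exact hbp.2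
      · rw [Nat.max_eq_left h]; exact hap.2
    have hmin_lt : (min a b : Nat) < max a b := by omega
    have hmaxN : (max a b : Nat) < N*N := by omega
    obtain ⟨hp', hform⟩ := pvRoot_set N par hp (max a b) (min a b) hmin_lt hmaxN hmaxfix
      (by
        rcases Nat.le_total a b with h | h
        · rw [Nat.min_eq_left h]; exact hap.2
        · rw [Nat.min_eq_right h]; exact hbp.2)
    refine ⟨hp', ?_⟩
    intro i hiN
    rw [hform i hiN, if_neg hab]

-- ===== the equivalence generated by a list of edges =====
def pvERel (E : List (Nat × Nat)) : Nat → Nat → Prop :=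
  Relation.ReflTransGen (fun i j => (i, j) ∈ E ∨ (j, i) ∈ E)

theorem pvERel_symm (E : List (Nat × Nat)) : ∀ i j, pvERel E i j → pvERel E j i := by
  intro i j h
  induction h with
  | refl => exact Relation.ReflTransGen.refl
  | @tail b c hab hbc ihh =>
      exact Relation.ReflTransGen.trans
        (Relation.ReflTransGen.single (Or.symm hbc)) ihh

theorem pvERel_mono (E E' : List (Nat × Nat)) (h : ∀ e ∈ E, e ∈ E') :
    ∀ i j, pvERel E i j → pvERel E' i j := by
  intro i j hr
  refine Relation.ReflTransGen.mono ?_ hr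
  intro a b hab
  rcases hab with h1 | h1
  · exact Or.inl (h _ h1)
  · exact Or.inr (h _ h1)

theorem pvERel_snoc (E : List (Nat × Nat)) (u w i j : Nat) :
    pvERel (E ++ [(u, w)]) i j ↔
      pvERel E i j ∨ (pvERel E i u ∧ pvERel E w j) ∨ (pvERel E i w ∧ pvERel E u j) := by
  constructor
  · intro h
    induction h with
    | refl => exact Or.inl Relation.ReflTransGen.refl
    | @tail b c hab hbc ihh =>
        have hE : ((b, c) ∈ E ∨ (c, b) ∈ E) ∨ (b = u ∧ c = w) ∨ (b = w ∧ c = u) := by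
          rcases hbc with h1 | h1 <;> rcases List.mem_append.mp h1 with h2 | h2
          · exact Or.inl (Or.inl h2)
          · rw [List.mem_singleton, Prod.mk.injEq] at h2
            exact Or.inr (Or.inl h2)
          · exact Or.inl (Or.inr h2)
          · rw [List.mem_singleton, Prod.mk.injEq] at h2
            exact Or.inr (Or.inr ⟨h2.2, h2.1⟩)
        rcases hE with hold | ⟨hbu, hcw⟩ | ⟨hbw, hcu⟩
        · rcases ihh with h1 | ⟨h1, h2⟩ | ⟨h1, h2⟩
          · exact Or.inl (h1.tail hold)
          · exact Or.inr (Or.inl ⟨h1, h2.tail hold⟩)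
          · exact Or.inr (Or.inr ⟨h1, h2.tail hold⟩)
        · subst hbu; subst hcw
          rcases ihh with h1 | ⟨h1, h2⟩ | ⟨h1, h2⟩
          · exact Or.inr (Or.inl ⟨h1, Relation.ReflTransGen.refl⟩)
          · exact Or.inl (h1.trans (pvERel_symm E _ _ h2))
          · exact Or.inl h1
        · subst hbw; subst hcu
          rcases ihh with h1 | ⟨h1, h2⟩ | ⟨h1, h2⟩
          · exact Or.inr (Or.inr ⟨h1, Relation.ReflTransGen.refl⟩)
          · exact Or.inl h1
          · exact Or.inl (h1.trans (pvERel_symm E _ _ h2))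
  · intro h
    have hmem : ∀ e ∈ E, e ∈ E ++ [(u, w)] := fun e he => List.mem_append_left _ he
    have hnew : pvERel (E ++ [(u, w)]) u w :=
      Relation.ReflTransGen.single (Or.inl (List.mem_append_right _ List.mem_cons_self))
    rcases h with h1 | ⟨h1, h2⟩ | ⟨h1, h2⟩
    · exact pvERel_mono E _ hmem i j h1
    · exact ((pvERel_mono E _ hmem i u h1).trans hnew).trans (pvERel_mono E _ hmem w j h2)
    · exact ((pvERel_mono E _ hmem i w h1).trans
        (pvERel_symm _ u w hnew)).trans (pvERel_mono E _ hmem u j h2)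

theorem pvERel_nil : ∀ i j, pvERel [] i j ↔ i = j := by
  intro i j
  constructor
  · intro h
    induction h with
    | refl => rfl
    | @tail b c hab hbc ihh => simp at hbc
  · intro h
    subst h
    exact Relation.ReflTransGen.refl

-- ===== processing the edges =====
def pvStepU (N : Nat) (par : List Int) (e : Nat × Nat) : List Int := pvUnion N par e.1 e.2

theorem pvUF_inv (N : Nat) :
    ∀ (E2 E1 : List (Nat × Nat)) (par : List Int),
    (∀ e ∈ E2, e.1 < N*N ∧ e.2 < N*N) →
    pvPinv N par →
    (∀ i, i < N*N → pvERel E1 i (pvRootF N par i)) →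
    (∀ i j, i < N*N → j < N*N → pvERel E1 i j → pvRootF N par i ≤ j) →
    (∀ i j, i < N*N → j < N*N → pvERel E1 i j → pvRootF N par i = pvRootF N par j) →
    pvPinv N (E2.foldl (pvStepU N) par) ∧
    (∀ i, i < N*N → pvERel (E1 ++ E2) i (pvRootF N (E2.foldl (pvStepU N) par) i)) ∧
    (∀ i j, i < N*N → j < N*N → pvERel (E1 ++ E2) i j →
      pvRootF N (E2.foldl (pvStepU N) par) i ≤ j) ∧
    (∀ i j, i < N*N → j < N*N → pvERel (E1 ++ E2) i j →
      pvRootF N (E2.foldl (pvStepU N) par) i = pvRootF N (E2.foldl (pvStepU N) par) j) := by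
  intro E2
  induction E2 with
  | nil =>
      intro E1 par _ hp h3 h4 h5
      simpa using ⟨hp, h3, h4, h5⟩
  | cons e E2 ih =>
      intro E1 par hok hp h3 h4 h5
      obtain ⟨heu, hew⟩ := hok e List.mem_cons_self
      obtain ⟨hp', hform⟩ := pvUnion_spec N par e.1 e.2 hp heu hew
      have hrootu := pvRoot_props N par hp e.1 heu
      have hrootw := pvRoot_props N par hp e.2 hew
      have hruN : pvRootF N par e.1 < N*N := by omega
      have hrwN : pvRootF N par e.2 < N*N := by omega
      -- the new processed relation
      have hsnoc := fun i j => pvERel_snoc E1 e.1 e.2 i j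
      have hE1cast : E1 ++ e :: E2 = (E1 ++ [e]) ++ E2 := by simp
      rw [hE1cast, List.foldl_cons]
      have hestep : pvStepU N par e = pvUnion N par e.1 e.2 := rfl
      rw [hestep]
      set a := pvRootF N par e.1 with hadef
      set b := pvRootF N par e.2 with hbdef
      have hformi : ∀ i, i < N*N → pvRootF N (pvUnion N par e.1 e.2) i =
          (if a = b then pvRootF N par i
           else if pvRootF N par i = max a b then min a b else pvRootF N par i) := hform
      -- invariant (3): root related
      have h3' : ∀ i, i < N*N → pvERel (E1 ++ [e]) i (pvRootF N (pvUnion N par e.1 e.2) i) := by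
        intro i hiN
        rw [hformi i hiN]
        have hbase : pvERel (E1 ++ [e]) i (pvRootF N par i) :=
          pvERel_mono E1 _ (fun x hx => List.mem_append_left _ hx) _ _ (h3 i hiN)
        by_cases hab : a = b
        · rw [if_pos hab]; exact hbase
        · rw [if_neg hab]
          by_cases hmax : pvRootF N par i = max a b
          · rw [if_pos hmax]
            -- i ~ max, and max ~ min through the new edge
            have hiu : pvERel E1 e.1 a := h3 e.1 heu
            have hiw : pvERel E1 e.2 b := h3 e.2 hew
            have hnew : pvERel (E1 ++ [e]) e.1 e.2 := by
              rw [pvERel_snoc]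
              exact Or.inr (Or.inl ⟨Relation.ReflTransGen.refl, Relation.ReflTransGen.refl⟩)
            have hmm : pvERel (E1 ++ [e]) (max a b) (min a b) := by
              have hua : pvERel (E1 ++ [e]) a e.1 :=
                pvERel_symm _ _ _ (pvERel_mono E1 _ (fun x hx => List.mem_append_left _ hx) _ _ hiu)
              have hwb : pvERel (E1 ++ [e]) e.2 b :=
                pvERel_mono E1 _ (fun x hx => List.mem_append_left _ hx) _ _ hiw
              have hab' : pvERel (E1 ++ [e]) a b := (hua.trans hnew).trans hwb
              rcases Nat.le_total a b with h | h
              · rw [Nat.max_eq_right h, Nat.min_eq_left h]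
                exact pvERel_symm _ _ _ hab'
              · rw [Nat.max_eq_left h, Nat.min_eq_right h]
                exact hab'
            exact (hmax ▸ hbase).trans hmm
          · rw [if_neg hmax]; exact hbase
      -- invariant (4): root is a lower bound of its class
      have h4' : ∀ i j, i < N*N → j < N*N → pvERel (E1 ++ [e]) i j →
          pvRootF N (pvUnion N par e.1 e.2) i ≤ j := by
        intro i j hiN hjN hij
        rw [hformi i hiN]
        rcases (hsnoc i j).mp hij with h1 | ⟨h1, h2⟩ | ⟨h1, h2⟩
        · by_cases hab : a = b
          · rw [if_pos hab]; exact h4 i j hiN hjN h1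
          · rw [if_neg hab]
            by_cases hmax : pvRootF N par i = max a b
            · rw [if_pos hmax]
              have := h4 i j hiN hjN h1
              omega
            · rw [if_neg hmax]; exact h4 i j hiN hjN h1
        · have hri : pvRootF N par i = a := h5 i e.1 hiN heu h1
          have hbj : b ≤ j := h4 e.2 j hew hjN h2
          by_cases hab : a = b
          · rw [if_pos hab]; omega
          · rw [if_neg hab]
            by_cases hmax : pvRootF N par i = max a b
            · rw [if_pos hmax]; omega
            · rw [if_neg hmax]; omega
        · have hri : pvRootF N par i = b := h5 i e.2 hiN hew h1
          have haj : a ≤ j := h4 e.1 j heu hjN h2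
          by_cases hab : a = b
          · rw [if_pos hab]; omega
          · rw [if_neg hab]
            by_cases hmax : pvRootF N par i = max a b
            · rw [if_pos hmax]; omega
            · rw [if_neg hmax]; omega
      -- invariant (5): completeness on the processed part
      have h5' : ∀ i j, i < N*N → j < N*N → pvERel (E1 ++ [e]) i j →
          pvRootF N (pvUnion N par e.1 e.2) i = pvRootF N (pvUnion N par e.1 e.2) j := by
        intro i j hiN hjN hij
        rw [hformi i hiN, hformi j hjN]
        rcases (hsnoc i j).mp hij with h1 | ⟨h1, h2⟩ | ⟨h1, h2⟩
        · rw [h5 i j hiN hjN h1]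
        · have hri : pvRootF N par i = a := h5 i e.1 hiN heu h1
          have hrj : pvRootF N par j = b := h5 j e.2 hjN hew (pvERel_symm _ _ _ h2)
          by_cases hab : a = b
          · rw [if_pos hab, if_pos hab, hri, hrj, hab]
          · rw [if_neg hab, if_neg hab, hri, hrj]
            rcases Nat.lt_or_ge a b with h | h
            · rw [if_neg (by omega), if_pos (by omega)]
              omega
            · rw [if_pos (by omega), if_neg (by omega)]
              omega
        · have hri : pvRootF N par i = b := h5 i e.2 hiN hew h1
          have hrj : pvRootF N par j = a := h5 j e.1 hjN heu (pvERel_symm _ _ _ h2)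
          by_cases hab : a = b
          · rw [if_pos hab, if_pos hab, hri, hrj, hab]
          · rw [if_neg hab, if_neg hab, hri, hrj]
            rcases Nat.lt_or_ge a b with h | h
            · rw [if_pos (by omega), if_neg (by omega)]
              omega
            · rw [if_neg (by omega), if_pos (by omega)]
              omega
      exact ih (E1 ++ [e]) (pvUnion N par e.1 e.2)
        (fun x hx => hok x (List.mem_cons_of_mem _ hx)) hp' h3' h4' h5'

-- ===== the edge list of port B =====
def pvCellOf (N : Nat) (i : Nat) : Nat × Nat := (i / N, i % N)

def pvEdgesOf (pic : List String) (N : Nat) (p : Char → Char → Bool) (c : Nat × Nat) :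
    List (Nat × Nat) :=
  (([((c.1+1 : Nat), c.2), (c.1, c.2+1)]).filter
    (fun n => decide (n.1 < N ∧ n.2 < N ∧ p (pvCharAt pic n.1 n.2) (pvCharAt pic c.1 c.2) = true))).map
    (fun n => (c.1*N + c.2, n.1*N + n.2))

def pvEdges (pic : List String) (N : Nat) (p : Char → Char → Bool) : List (Nat × Nat) :=
  (pvCells N).flatMap (pvEdgesOf pic N p)

theorem pvInner_eq (pic : List String) (N : Nat) (p : Char → Char → Bool) (y x : Nat)
    (par : List Int) :
    [((y+1 : Nat), x), (y, x+1)].foldl (fun par (c : Nat × Nat) =>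
      if c.1 < N ∧ c.2 < N ∧ p (pvCharAt pic c.1 c.2) (pvCharAt pic y x) = true then
        pvUnion N par (y*N + x) (c.1*N + c.2)
      else par) par
    = (pvEdgesOf pic N p (y, x)).foldl (pvStepU N) par := by
  by_cases h1 : ((y+1 : Nat) < N ∧ x < N ∧ p (pvCharAt pic (y+1) x) (pvCharAt pic y x) = true) <;>
  by_cases h2 : (y < N ∧ (x+1 : Nat) < N ∧ p (pvCharAt pic y (x+1)) (pvCharAt pic y x) = true) <;>
    simp [pvEdgesOf, List.filter, h1, h2, pvStepU]

theorem pvFold_edges (pic : List String) (N : Nat) (p : Char → Char → Bool) (par0 : List Int) :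
    (List.range N).foldl (fun par y => (List.range N).foldl (fun par x =>
      [(y+1, x), (y, x+1)].foldl (fun par (c : Nat × Nat) =>
        if c.1 < N ∧ c.2 < N ∧ p (pvCharAt pic c.1 c.2) (pvCharAt pic y x) = true then
          pvUnion N par (y*N + x) (c.1*N + c.2)
        else par) par) par) par0
    = (pvEdges pic N p).foldl (pvStepU N) par0 := by
  unfold pvEdges pvCells
  rw [List.foldl_flatMap, List.foldl_flatMap]
  simp only [List.foldl_map]
  congr 1
  funext par y
  congr 1
  funext par' x'
  exact pvInner_eq pic N p y x' par'

def pvParF (pic : List String) (N : Nat) (p : Char → Char → Bool) : List Int :=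
  (pvEdges pic N p).foldl (pvStepU N) ((List.range (N*N)).map (fun i : Nat => (i : Int)))

theorem pvCount_eq (pic : List String) (N : Nat) (p : Char → Char → Bool) :
    pvCount pic N p = ((List.range (N*N)).countP (fun i =>
      (pvParF pic N p).getD i 0 == (i : Int)) : Int) := by
  simp only [pvCount]
  rw [pvFold_edges]
  rfl

-- index/cell conversions
theorem pvIdx_lt (N : Nat) (c : Nat × Nat) (h : pvInB N c) : pvIdx N c < N*N := by
  obtain ⟨h1, h2⟩ := h
  have h3 : (c.1+1) * N ≤ N * N := Nat.mul_le_mul_right N h1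
  have h4 : (c.1+1) * N = c.1 * N + N := by ring
  simp only [pvIdx]
  omega

theorem pvCellOf_spec (N : Nat) (i : Nat) (h : i < N*N) :
    pvInB N (pvCellOf N i) ∧ pvIdx N (pvCellOf N i) = i := by
  have hN : 0 < N := by
    rcases Nat.eq_zero_or_pos N with h0 | h0
    · subst h0; omega
    · exact h0
  have hdiv : i / N < N := Nat.div_lt_of_lt_mul (by omega)
  have hmod : i % N < N := Nat.mod_lt i hN
  refine ⟨⟨hdiv, hmod⟩, ?_⟩
  simp only [pvIdx, pvCellOf]
  have h5 := Nat.div_add_mod i N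
  have h6 : (i / N) * N = N * (i / N) := by ring
  omega

theorem pvCell_idx (N : Nat) (c : Nat × Nat) (h : pvInB N c) :
    pvCellOf N (pvIdx N c) = c := by
  obtain ⟨h1, h2⟩ := h
  have hN : 0 < N := by omega
  simp only [pvCellOf, pvIdx]
  have hcomm : c.1 * N + c.2 = N * c.1 + c.2 := by ring
  rw [hcomm, Nat.mul_add_div hN, Nat.mul_add_mod, Nat.div_eq_of_lt h2, Nat.mod_eq_of_lt h2]
  simp

theorem pvEdges_sound (pic : List String) (N : Nat) (p : Char → Char → Bool) :
    ∀ e ∈ pvEdges pic N p, ∃ cc nn, pvInB N cc ∧ pvInB N nn ∧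
      e = (pvIdx N cc, pvIdx N nn) ∧ pvStep pic N p (fun _ => True) cc nn := by
  intro e he
  simp only [pvEdges, List.mem_flatMap] at he
  obtain ⟨c, hc, he2⟩ := he
  have hcB := (pvCells_mem N c).mp hc
  simp only [pvEdgesOf, List.mem_map, List.mem_filter, List.mem_cons, List.not_mem_nil,
    or_false, decide_eq_true_eq] at he2
  obtain ⟨n, ⟨hmem, h1, h2, h3⟩, rfl⟩ := he2
  refine ⟨c, n, hcB, ⟨h1, h2⟩, rfl, hcB, ⟨h1, h2⟩, trivial, ?_, h3⟩
  rcases hmem with h4 | h4 <;> subst h4 <;> simp [pvNbr]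

theorem pvEdges_ok (pic : List String) (N : Nat) (p : Char → Char → Bool) :
    ∀ e ∈ pvEdges pic N p, e.1 < N*N ∧ e.2 < N*N := by
  intro e he
  obtain ⟨cc, nn, hc, hn, rfl, _⟩ := pvEdges_sound pic N p e he
  exact ⟨pvIdx_lt N cc hc, pvIdx_lt N nn hn⟩

theorem pvEdges_complete (pic : List String) (N : Nat) (p : Char → Char → Bool)
    (hp : ∀ a b, p a b = p b a) :
    ∀ a b, pvStep pic N p (fun _ => True) a b →
      (pvIdx N a, pvIdx N b) ∈ pvEdges pic N p ∨ (pvIdx N b, pvIdx N a) ∈ pvEdges pic N p := by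
  intro a b hstep
  obtain ⟨hA, hB, -, hnbr, hpred⟩ := hstep
  have hmk : ∀ (c n : Nat × Nat), pvInB N c → pvInB N n →
      (n = ((c.1+1 : Nat), c.2) ∨ n = (c.1, (c.2+1 : Nat))) →
      p (pvCharAt pic n.1 n.2) (pvCharAt pic c.1 c.2) = true →
      (pvIdx N c, pvIdx N n) ∈ pvEdges pic N p := by
    intro c n hc hn hor hpr
    simp only [pvEdges, List.mem_flatMap]
    refine ⟨c, (pvCells_mem N c).mpr hc, ?_⟩
    simp only [pvEdgesOf, List.mem_map, List.mem_filter, List.mem_cons, List.not_mem_nil,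
      or_false, decide_eq_true_eq]
    exact ⟨n, ⟨hor, hn.1, hn.2, hpr⟩, rfl⟩
  rcases hnbr with ⟨h1, h2 | h2⟩ | ⟨h1, h2 | h2⟩
  · -- b is right of a
    exact Or.inl (hmk a b hA hB (Or.inr (by apply Prod.ext <;> simp <;> omega)) hpred)
  · -- b is left of a : a is right of b
    refine Or.inr (hmk b a hB hA (Or.inr (by apply Prod.ext <;> simp <;> omega)) ?_)
    rw [hp]
    exact hpred
  · -- b is below a
    exact Or.inl (hmk a b hA hB (Or.inl (by apply Prod.ext <;> simp <;> omega)) hpred)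
  · -- b is above a : a is below b
    refine Or.inr (hmk b a hB hA (Or.inl (by apply Prod.ext <;> simp <;> omega)) ?_)
    rw [hp]
    exact hpred

theorem pvERel_to_conn (pic : List String) (N : Nat) (p : Char → Char → Bool)
    (hp : ∀ a b, p a b = p b a) :
    ∀ i j, pvERel (pvEdges pic N p) i j →
      pvConn pic N p (pvCellOf N i) (pvCellOf N j) := by
  have hedge : ∀ b c, (b, c) ∈ pvEdges pic N p →
      pvConn pic N p (pvCellOf N b) (pvCellOf N c) := by
    intro b c hbc
    obtain ⟨cc, nn, hc, hn, he, hstep⟩ := pvEdges_sound pic N p _ hbc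
    rw [Prod.mk.injEq] at he
    rw [he.1, he.2, pvCell_idx N cc hc, pvCell_idx N nn hn]
    exact Relation.ReflTransGen.single hstep
  intro i j h
  induction h with
  | refl => exact Relation.ReflTransGen.refl
  | @tail b c hab hbc ihh =>
      rcases hbc with h1 | h1
      · exact ihh.trans (hedge _ _ h1)
      · exact ihh.trans (pvConn_symm pic N p hp _ _ (hedge _ _ h1))

theorem pvConn_to_ERel (pic : List String) (N : Nat) (p : Char → Char → Bool)
    (hp : ∀ a b, p a b = p b a) :
    ∀ a b, pvConn pic N p a b → pvERel (pvEdges pic N p) (pvIdx N a) (pvIdx N b) := by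
  intro a b h
  induction h with
  | refl => exact Relation.ReflTransGen.refl
  | @tail b' c' hab hbc ihh =>
      rcases pvEdges_complete pic N p hp b' c' hbc with h1 | h1
      · exact ihh.tail (Or.inl h1)
      · exact ihh.tail (Or.inr h1)

theorem pvPar0_entry (N : Nat) : ∀ i, i < N*N →
    ((List.range (N*N)).map (fun i => ((i:Nat):Int)))[i]? = some ((i:Nat):Int) := by
  intro i h
  rw [List.getElem?_map, List.getElem?_range h]
  rfl

theorem pvCount_first (pic : List String) (N : Nat) (p : Char → Char → Bool)
    (hp : ∀ a b, p a b = p b a) :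
    pvCount pic N p =
      ((List.range (N*N)).countP (fun i => pvDecFirst pic N p (pvCellOf N i)) : Int) := by
  rw [pvCount_eq]
  congr 1
  have hp0 : pvPinv N ((List.range (N*N)).map (fun i => ((i:Nat):Int))) :=
    ⟨by simp, fun i h => ⟨i, pvPar0_entry N i h, le_refl i⟩⟩
  have hroot0 : ∀ i, i < N*N → pvRootF N ((List.range (N*N)).map (fun i => ((i:Nat):Int))) i = i :=
    fun i h => pvRoot_fix_of N _ hp0 i h (pvPar0_entry N i h)
  obtain ⟨hpF0, h3F0, h4F0, h5F0⟩ := pvUF_inv N (pvEdges pic N p) [] _ (pvEdges_ok pic N p) hp0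
    (fun i h => by rw [hroot0 i h]; exact Relation.ReflTransGen.refl)
    (fun i j hi hj hij => by
      have he := (pvERel_nil i j).mp hij
      rw [hroot0 i hi]
      omega)
    (fun i j hi hj hij => by
      have he := (pvERel_nil i j).mp hij
      subst he
      rfl)
  simp only [List.nil_append] at h3F0 h4F0 h5F0
  have hpF : pvPinv N (pvParF pic N p) := by unfold pvParF; exact hpF0
  have h3F : ∀ i, i < N*N → pvERel (pvEdges pic N p) i (pvRootF N (pvParF pic N p) i) := by
    unfold pvParF; exact h3F0
  have h4F : ∀ i j, i < N*N → j < N*N → pvERel (pvEdges pic N p) i j →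
      pvRootF N (pvParF pic N p) i ≤ j := by
    unfold pvParF; exact h4F0
  apply List.countP_congr
  intro i hi
  rw [List.mem_range] at hi
  obtain ⟨k, hk, hki⟩ := hpF.2 i hi
  have hgetD : (pvParF pic N p).getD i 0 = ((k:Nat):Int) := by
    rw [List.getD_eq_getElem?_getD, hk]
    rfl
  have hcell := pvCellOf_spec N i hi
  rw [hgetD, beq_iff_eq]
  constructor
  · intro hke
    have hkeq : k = i := by exact_mod_cast hke
    rw [hkeq] at hk
    have hrooti : pvRootF N (pvParF pic N p) i = i :=
      pvRoot_fix_of N _ hpF i hi hk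
    unfold pvDecFirst
    refine @decide_eq_true _ (Classical.propDecidable _) ?_
    intro j hjB hjidx hconn
    rw [hcell.2] at hjidx
    have hjN : pvIdx N j < N*N := by omega
    have hre := pvConn_to_ERel pic N p hp j _ hconn
    rw [hcell.2] at hre
    have h4 := h4F i (pvIdx N j) hi hjN (pvERel_symm _ _ _ hre)
    rw [hrooti] at h4
    omega
  · intro hdec
    have hF : pvFirst pic N p (pvCellOf N i) := by
      unfold pvDecFirst at hdec
      exact @of_decide_eq_true _ (Classical.propDecidable _) hdec
    have hroot : pvRootF N (pvParF pic N p) i = i := by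
      by_contra hne
      have hprops := pvRoot_props N _ hpF i hi
      have hrlt : pvRootF N (pvParF pic N p) i < i := by omega
      have hre := h3F i hi
      have hconn := pvERel_to_conn pic N p hp i _ hre
      have hrN : pvRootF N (pvParF pic N p) i < N*N := by omega
      have hrcell := pvCellOf_spec N _ hrN
      exact hF (pvCellOf N _) hrcell.1 (by rw [hcell.2, hrcell.2]; exact hrlt)
        (pvConn_symm pic N p hp _ _ hconn)
    have hent := (pvRoot_id N _ hpF i hi).mpr hroot
    rw [hk] at hent
    have heq : ((k:Nat):Int) = ((i:Nat):Int) := by injection hent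
    exact heq

theorem pvCells_perm (N : Nat) : (pvCells N).Perm ((List.range (N*N)).map (pvCellOf N)) := by
  have hnd1 : (pvCells N).Nodup := by
    refine List.Pairwise.imp ?_ (pvCells_sorted N)
    intro a b hab he
    subst he
    omega
  have hnd2 : ((List.range (N*N)).map (pvCellOf N)).Nodup := by
    refine List.Nodup.map_on ?_ List.nodup_range
    intro x hx y hy hxy
    rw [List.mem_range] at hx hy
    have h1 := (pvCellOf_spec N x hx).2
    have h2 := (pvCellOf_spec N y hy).2
    rw [← h1, ← h2, hxy]
  rw [List.perm_ext_iff_of_nodup hnd1 hnd2]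
  intro c
  rw [pvCells_mem]
  simp only [List.mem_map, List.mem_range]
  constructor
  · intro h
    exact ⟨pvIdx N c, pvIdx_lt N c h, pvCell_idx N c h⟩
  · rintro ⟨i, hi, rfl⟩
    exact (pvCellOf_spec N i hi).1

theorem pvScanA_count2 (pic : List String) (N : Nat) (p : Char → Char → Bool)
    (hp : ∀ a b, p a b = p b a) :
    (pvScan pic N p).1 =
      ((List.range (N*N)).countP (fun i => pvDecFirst pic N p (pvCellOf N i)) : Int) := by
  rw [pvScanA_count pic N p hp]
  congr 1
  rw [List.Perm.countP_eq _ (pvCells_perm N), List.countP_map]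
  rfl

theorem pvMaster (pic : List String) (N : Nat) (p : Char → Char → Bool)
    (hp : ∀ a b, p a b = p b a) :
    (pvScan pic N p).1 = pvCount pic N p := by
  rw [pvScanA_count2 pic N p hp, pvCount_first pic N p hp]

theorem pvPredNormal_symm : ∀ a b : Char, pvPredNormal a b = pvPredNormal b a := by
  intro a b
  unfold pvPredNormal
  rw [Bool.eq_iff_iff]
  simp only [beq_iff_eq]
  exact eq_comm

theorem pvPredWeak_symm : ∀ a b : Char, pvPredWeak a b = pvPredWeak b a := by
  intro a b
  unfold pvPredWeak
  by_cases hab : a = b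
  · subst hab; rfl
  · rw [Bool.eq_iff_iff]
    simp only [Bool.or_eq_true, Bool.and_eq_true, beq_iff_eq]
    constructor
    · rintro ((h | ⟨h1, h2⟩) | ⟨h1, h2⟩)
      · exact absurd h hab
      · exact Or.inr ⟨h2, h1⟩
      · exact Or.inl (Or.inr ⟨h2, h1⟩)
    · rintro ((h | ⟨h1, h2⟩) | ⟨h1, h2⟩)
      · exact absurd h.symm hab
      · exact Or.inr ⟨h2, h1⟩
      · exact Or.inl (Or.inr ⟨h2, h1⟩)

theorem pvWeakEq : pvSameWeak = pvPredWeak := by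
  funext a b
  unfold pvSameWeak pvPredWeak
  rw [Bool.eq_iff_iff]
  simp only [Bool.or_eq_true, Bool.and_eq_true, beq_iff_eq]
  constructor
  · rintro (h | ⟨h1 | h1, h2 | h2⟩)
    · exact Or.inl (Or.inl h)
    · exact Or.inl (Or.inl (h1.trans h2.symm))
    · exact Or.inl (Or.inr ⟨h1, h2⟩)
    · exact Or.inr ⟨h1, h2⟩
    · exact Or.inl (Or.inl (h1.trans h2.symm))
  · rintro ((h | ⟨h1, h2⟩) | ⟨h1, h2⟩)
    · exact Or.inl h
    · exact Or.inr ⟨Or.inl h1, Or.inr h2⟩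
    · exact Or.inr ⟨Or.inr h1, Or.inl h2⟩

theorem solve_eq_alt : ∀ pic : List String, solve pic = solve_alt pic := by
  intro pic
  simp only [solve, solve_alt]
  rw [show (fun c1 c2 : Char => c1 == c2) = pvPredNormal from rfl, pvWeakEq]
  rw [pvMaster pic pic.length pvPredNormal pvPredNormal_symm,
    pvMaster pic pic.length pvPredWeak pvPredWeak_symm]

-- ===== VERDICT (by name: the statement is the Claim_ definition above) =====
theorem solve_spec : Claim_equal_solve := by
  intro pic _ _
  unfold Spec_solve
  exact solve_eq_alt pic
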